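-- pv_equiv track=rewrite | github.com/cdberga/.dotfiles | .config/i3/gen_desktop_image.py | get_eligible_lines
-- ===== SOURCE A (Python) =====
-- INIT_READING = "### Init Read for Desktop Image ###"
--
-- END_READING = "### End Read for Desktop Image ###"
--
-- CHANGE_STRING_LIST = [("bindsym ", ""), ("$mod", "Win"), (" exec ", " => ")]
--
-- def command_filter(line, prev_line):
--     for item in CHANGE_STRING_LIST:
--         line = line.replace(item[0], item[1])
--
--     if prev_line.startswith("#"):
--         line = add_comment(line, prev_line.split('#')[1])
--
--     if " => " in line:
--         line_arr = line.split(" => ")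
--         line = line_arr[0].upper() + " => " + line_arr[1]
--     return line
--
-- def add_comment(line, prev_line):
--     command = line.split(" => ")
--     description = prev_line.replace('#', '')
--     return description.strip() + " => " + command[0].replace('\n', '')
--
-- def get_eligible_lines(arr):
--     is_reading = False
--     header_lines = []
--     lines_list = []
--     prev_line = ''
--     cur_line = ''
--
--     header_lines.append("--- Desktop Main Shortcuts ---")
--     header_lines.append("______________________________")
--     for line in arr:
--         if line.rstrip() == INIT_READING:
--             is_reading = True
--         elif line.rstrip() == END_READING:
--             is_reading = False
--         elif is_reading == True:
--             cur_line = command_filter(line, prev_line)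
--             if not cur_line.startswith('#'):
--                 lines_list.append(cur_line)
--             prev_line = line
--
--     lines_list.sort()
--     lines_list = header_lines + lines_list
--     return lines_list
-- ===== SOURCE B (Python) =====
-- INIT_READING = "### Init Read for Desktop Image ###"
--
-- END_READING = "### End Read for Desktop Image ###"
--
-- CHANGE_STRING_LIST = [("bindsym ", ""), ("$mod", "Win"), (" exec ", " => ")]
--
-- def command_filter(line, prev_line):
--     for item in CHANGE_STRING_LIST:
--         line = line.replace(item[0], item[1])
--
--     if prev_line.startswith("#"):
--         line = add_comment(line, prev_line.split('#')[1])
--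
--     if " => " in line:
--         line_arr = line.split(" => ")
--         line = line_arr[0].upper() + " => " + line_arr[1]
--     return line
--
-- def add_comment(line, prev_line):
--     command = line.split(" => ")
--     description = prev_line.replace('#', '')
--     return description.strip() + " => " + command[0].replace('\n', '')
--
-- def _insort(xs, x):
--     # insert x into the already-sorted list xs, after any equal elements
--     i = 0
--     n = len(xs)
--     while i < n and xs[i] <= x:
--         i += 1
--     xs.insert(i, x)
--
-- def get_eligible_lines(arr):
--     # No reading flag and no final sort: two alternating scan loops
--     # (skip to an INIT marker / consume the section up to an END marker),
--     # and the output list is kept sorted at all times by ordered insertion.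
--     out = []
--     prev = ''
--     pos, n = 0, len(arr)
--     while pos < n:
--         if arr[pos].rstrip() != INIT_READING:   # outside a section: skip
--             pos += 1
--             continue
--         pos += 1                                # enter the section
--         while pos < n and arr[pos].rstrip() != END_READING:
--             line = arr[pos]
--             pos += 1
--             if line.rstrip() == INIT_READING:   # redundant INIT: ignore
--                 continue
--             cur = command_filter(line, prev)
--             if not cur.startswith('#'):
--                 _insort(out, cur)
--             prev = line
--         pos += 1                                # step past the END marker
--     return ["--- Desktop Main Shortcuts ---",
--             "______________________________"] + out
-- ===== Notes on version B (the rewrite author's own statement) =====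
-- stated objective: alternative
-- what changed: A's single flag-driven pass with a final sort is replaced by two alternating scan loops (skip to an INIT marker, then consume lines until the END marker) that maintain the output list sorted at all times via ordered insertion, so there is no reading flag and no final sort call.
import Mathlib
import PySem

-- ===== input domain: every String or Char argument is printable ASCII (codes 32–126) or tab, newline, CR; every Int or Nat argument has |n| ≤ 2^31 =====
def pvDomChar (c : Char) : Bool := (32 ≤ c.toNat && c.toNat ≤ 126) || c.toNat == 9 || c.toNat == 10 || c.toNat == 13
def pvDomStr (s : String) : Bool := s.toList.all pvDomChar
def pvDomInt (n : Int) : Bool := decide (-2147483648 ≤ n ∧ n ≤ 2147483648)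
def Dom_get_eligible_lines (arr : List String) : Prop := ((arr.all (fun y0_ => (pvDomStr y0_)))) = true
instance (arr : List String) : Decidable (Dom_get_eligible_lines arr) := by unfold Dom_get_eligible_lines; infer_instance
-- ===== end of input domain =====

-- B replaces A's flag-driven single pass + final sort by two alternating scan loops
-- (skip to INIT / consume to END) that keep the output sorted by ordered insertion,
-- with no reading flag and no final sort (objective: alternative, same cost).

-- shared helpers (Python's command_filter / add_comment, identical in A and B).
-- Python's split(sep) with sep ≠ "" is PySem.Str.split? …, always some, hence getD [];
-- command[0] always exists (split is never empty) and parts.getD 1 "" is exact under the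
-- startswith "#" guard (split on "#" then has ≥ 2 parts), so headD/getD are exact here.
def pvAddComment (line prev_line : String) : String :=
  let command := (PySem.Str.split? line " => ").getD []
  let description := PySem.Str.replace prev_line "#" ""
  PySem.Str.strip description ++ " => " ++ PySem.Str.replace (command.headD "") "\n" ""

def pvCommandFilter (line prev_line : String) : String :=
  let line1 := PySem.Str.replace line "bindsym " ""
  let line2 := PySem.Str.replace line1 "$mod" "Win"
  let line3 := PySem.Str.replace line2 " exec " " => "
  let line4 := if PySem.Str.startswith prev_line "#"
    then pvAddComment line3 (((PySem.Str.split? prev_line "#").getD []).getD 1 "")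
    else line3
  if PySem.Str.isIn " => " line4 then
    let line_arr := (PySem.Str.split? line4 " => ").getD []
    PySem.Str.upper (line_arr.headD "") ++ " => " ++ line_arr.getD 1 ""
  else line4

-- ===== PORT A =====
def get_eligible_lines (arr : List String) : List String :=
  let header := ["--- Desktop Main Shortcuts ---", "______________________________"]
  let st := arr.foldl (fun (st : Bool × List String × String) line =>
    if PySem.Str.rstrip line == "### Init Read for Desktop Image ###" then
      (true, st.2.1, st.2.2)
    else if PySem.Str.rstrip line == "### End Read for Desktop Image ###" then
      (false, st.2.1, st.2.2)
    else if st.1 then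
      (true,
       if PySem.Str.startswith (pvCommandFilter line st.2.2) "#" then st.2.1
       else st.2.1 ++ [pvCommandFilter line st.2.2],
       line)
    else st) (false, [], "")
  header ++ PySem.List.sorted st.2.1 (fun x => x) false

-- ===== PORT B =====
-- _insort: insert x into the sorted list, after any equal elements (the Python
-- while-scan + list.insert, as structural recursion over the list).
def pvInsort : List String → String → List String
  | [], x => [x]
  | y :: t, x => if y ≤ x then y :: pvInsort t x else x :: y :: t

-- the two alternating scan loops of Source B: pvOutside is the outer skip-to-INIT loop,
-- pvInside the inner consume-until-END loop (the index `pos` becomes the remaining list).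
mutual
def pvOutside : List String → String → List String → List String
  | [], _, out => out
  | l :: t, prev, out =>
    if PySem.Str.rstrip l == "### Init Read for Desktop Image ###" then pvInside t prev out
    else pvOutside t prev out
def pvInside : List String → String → List String → List String
  | [], _, out => out
  | l :: t, prev, out =>
    if PySem.Str.rstrip l == "### End Read for Desktop Image ###" then pvOutside t prev out
    else if PySem.Str.rstrip l == "### Init Read for Desktop Image ###" then pvInside t prev out
    else
      pvInside t l
        (if PySem.Str.startswith (pvCommandFilter l prev) "#" then out
         else pvInsort out (pvCommandFilter l prev))
end

def get_eligible_lines_alt (arr : List String) : List String :=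
  ["--- Desktop Main Shortcuts ---", "______________________________"] ++ pvOutside arr "" []

-- ===== PRECONDITION & SPEC =====
def Spec_get_eligible_lines (arr : List String) (out : List String) : Prop := out = get_eligible_lines_alt arr
instance (arr : List String) (out : List String) : Decidable (Spec_get_eligible_lines arr out) := by unfold Spec_get_eligible_lines; infer_instance

-- ===== CLAIM (what is proved, stated in full; the proofs are below) =====
def Claim_equal_get_eligible_lines : Prop := ∀ (arr : List String), Dom_get_eligible_lines arr → Spec_get_eligible_lines arr (get_eligible_lines arr)

-- ===== LEMMAS AND PROOFS =====

-- ghost recursions: the raw reading lines, and the kept filtered lines in scan order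
def pvExt : List String → Bool → List String
  | [], _ => []
  | l :: t, r =>
    if PySem.Str.rstrip l == "### Init Read for Desktop Image ###" then pvExt t true
    else if PySem.Str.rstrip l == "### End Read for Desktop Image ###" then pvExt t false
    else if r then l :: pvExt t r else pvExt t r

def pvProc : List String → String → List String
  | [], _ => []
  | l :: t, prev =>
    (if PySem.Str.startswith (pvCommandFilter l prev) "#" then []
     else [pvCommandFilter l prev]) ++ pvProc t l

theorem pvA_loop (arr : List String) : ∀ (r : Bool) (acc : List String) (prev : String),
    (arr.foldl (fun (st : Bool × List String × String) line =>
      if PySem.Str.rstrip line == "### Init Read for Desktop Image ###" then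
        (true, st.2.1, st.2.2)
      else if PySem.Str.rstrip line == "### End Read for Desktop Image ###" then
        (false, st.2.1, st.2.2)
      else if st.1 then
        (true,
         if PySem.Str.startswith (pvCommandFilter line st.2.2) "#" then st.2.1
         else st.2.1 ++ [pvCommandFilter line st.2.2],
         line)
      else st) (r, acc, prev)).2.1 = acc ++ pvProc (pvExt arr r) prev := by
  induction arr with
  | nil => intro r acc prev; simp [pvExt, pvProc]
  | cons l t ih =>
    intro r acc prev
    rw [List.foldl_cons]
    unfold pvExt
    by_cases h1 : (PySem.Str.rstrip l == "### Init Read for Desktop Image ###") = true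
    · rw [if_pos h1, if_pos h1, ih]
    · rw [if_neg h1, if_neg h1]
      by_cases h2 : (PySem.Str.rstrip l == "### End Read for Desktop Image ###") = true
      · rw [if_pos h2, if_pos h2, ih]
      · rw [if_neg h2, if_neg h2]
        cases r with
        | false =>
          rw [if_neg Bool.false_ne_true, if_neg Bool.false_ne_true, ih]
        | true =>
          rw [if_pos rfl, if_pos rfl]
          unfold pvProc
          dsimp only
          by_cases h3 : PySem.Str.startswith (pvCommandFilter l prev) "#" = true
          · rw [if_pos h3, if_pos h3, ih]
            simp
          · rw [if_neg h3, if_neg h3, ih]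
            simp

-- B's ordered insertion is PySem's insertBy on (· < ·)
theorem pvInsort_eq_insertBy (out : List String) (x : String) :
    pvInsort out x = PySem.List.insertBy (fun a b => decide (a < b)) x out := by
  induction out with
  | nil => rfl
  | cons y t ih =>
    unfold pvInsort PySem.List.insertBy
    by_cases h : y ≤ x
    · rw [if_pos h, if_neg (by simpa using not_lt.mpr h), ih]
    · rw [if_neg h, if_pos (by simpa using not_le.mp h)]

theorem foldl_pvInsort (xs : List String) : ∀ (acc : List String),
    xs.foldl pvInsort acc =
      xs.foldl (fun acc x => PySem.List.insertBy (fun a b => decide (a < b)) x acc) acc := by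
  induction xs with
  | nil => intro acc; rfl
  | cons x t ih => intro acc; rw [List.foldl_cons, List.foldl_cons, pvInsort_eq_insertBy, ih]

-- both scan loops compute a fold of ordered insertions over the kept filtered lines
theorem pvIO_eq (arr : List String) : ∀ (prev : String) (out : List String),
    pvInside arr prev out = (pvProc (pvExt arr true) prev).foldl pvInsort out ∧
    pvOutside arr prev out = (pvProc (pvExt arr false) prev).foldl pvInsort out := by
  induction arr with
  | nil => intro prev out; simp [pvInside, pvOutside, pvExt, pvProc]
  | cons l t ih =>
    intro prev out
    cases hI : (PySem.Str.rstrip l == "### Init Read for Desktop Image ###") with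
    | true =>
      have hE : (PySem.Str.rstrip l == "### End Read for Desktop Image ###") = false := by
        cases hx : (PySem.Str.rstrip l == "### End Read for Desktop Image ###") with
        | false => rfl
        | true => exact absurd ((eq_of_beq hI).symm.trans (eq_of_beq hx)) (by decide)
      simp only [pvInside, pvOutside, pvExt, hI, hE, Bool.false_eq_true, if_true, if_false]
      exact ⟨(ih prev out).1, (ih prev out).1⟩
    | false =>
      cases hE : (PySem.Str.rstrip l == "### End Read for Desktop Image ###") with
      | true =>
        simp only [pvInside, pvOutside, pvExt, hI, hE, Bool.false_eq_true, if_true, if_false]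
        exact ⟨(ih prev out).2, (ih prev out).2⟩
      | false =>
        simp only [pvInside, pvOutside, pvExt, hI, hE, Bool.false_eq_true, if_true, if_false, pvProc]
        refine ⟨?_, (ih prev out).2⟩
        cases h3 : PySem.Str.startswith (pvCommandFilter l prev) "#" with
        | true =>
          simp only [if_true, List.nil_append]
          exact (ih l out).1
        | false =>
          simp only [Bool.false_eq_true, if_false, List.singleton_append, List.foldl_cons]
          exact (ih l (pvInsort out (pvCommandFilter l prev))).1

-- fold of ordered insertions from [] IS Python's sort (stable sort of strings)
theorem foldl_pvInsort_sorted (xs : List String) :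
    xs.foldl pvInsort [] = PySem.List.sorted xs (fun x => x) false := by
  rw [foldl_pvInsort, PySem.List.sorted_eq_foldl_insertBy]

-- ===== VERDICT (by name: the statement is the Claim_ definition above) =====
theorem get_eligible_lines_spec : Claim_equal_get_eligible_lines := by
  unfold Claim_equal_get_eligible_lines Spec_get_eligible_lines
  intro arr _
  show get_eligible_lines arr = get_eligible_lines_alt arr
  simp only [get_eligible_lines, get_eligible_lines_alt]
  rw [pvA_loop, (pvIO_eq arr "" []).2, foldl_pvInsort_sorted]
  simp
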